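-- pv_equiv track=rewrite | github.com/k-harada/AtCoder | ABC/ABC201-250/ABC243/C.py | solve
-- ===== SOURCE A (Python) =====
-- def solve(n, xy_list, s):
--     left_dict = dict()
--     right_dict = dict()
--     for i in range(n):
--         x, y = xy_list[i]
--         if s[i] == "L":
--             if y not in left_dict.keys():
--                 left_dict[y] = x
--             else:
--                 left_dict[y] = max(x, left_dict[y])
--             if y in right_dict.keys():
--                 if right_dict[y] < x:
--                     return "Yes"
--         else:
--             if y not in right_dict.keys():
--                 right_dict[y] = x
--             else:
--                 right_dict[y] = min(x, right_dict[y])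
--             if y in left_dict.keys():
--                 if left_dict[y] > x:
--                     return "Yes"
--     return "No"
-- ===== SOURCE B (Python) =====
-- def solve(n, xy_list, s):
--     # Sort-then-scan: no dictionaries. Project each person to (y, x, dir),
--     # sort by (row, x), then sweep once: within a row (contiguous after the
--     # sort) remember the x of the first (= leftmost) right-walker; any later
--     # left-walker strictly to its right collides.
--     people = [(xy_list[i][1], xy_list[i][0], s[i]) for i in range(n)]
--     people.sort(key=lambda t: (t[0], t[1]))
--     cur_y = None
--     first_r = None
--     for y, x, c in people:
--         if cur_y != y:
--             cur_y = y
--             first_r = None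
--         if c == "L":
--             if first_r is not None and first_r < x:
--                 return "Yes"
--         elif first_r is None:
--             first_r = x
--     return "No"
-- ===== Notes on version B (the rewrite author's own statement) =====
-- stated objective: alternative
-- what changed: Replaces A's online dict-based pass (per-row max-L/min-R dictionaries cross-checked at every step with early return) by a sort-then-scan algorithm: project to (row, x, dir) triples, sort them by (row, x), and sweep once keeping only the leftmost right-walker of the current contiguous row block; no dictionaries at all.
import Mathlib
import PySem

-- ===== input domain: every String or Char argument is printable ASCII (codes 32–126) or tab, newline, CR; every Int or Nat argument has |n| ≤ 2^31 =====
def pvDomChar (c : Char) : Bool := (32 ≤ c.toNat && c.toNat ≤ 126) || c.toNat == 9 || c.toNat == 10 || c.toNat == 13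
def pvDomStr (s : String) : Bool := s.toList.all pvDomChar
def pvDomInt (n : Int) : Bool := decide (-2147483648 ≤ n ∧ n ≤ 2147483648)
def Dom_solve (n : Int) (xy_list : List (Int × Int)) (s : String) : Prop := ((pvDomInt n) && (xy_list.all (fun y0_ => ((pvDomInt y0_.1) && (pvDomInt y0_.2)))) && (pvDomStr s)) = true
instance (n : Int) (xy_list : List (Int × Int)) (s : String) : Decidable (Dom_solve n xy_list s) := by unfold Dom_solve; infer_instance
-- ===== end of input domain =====

-- B replaces A's online dict-based collision detection by a sort-then-scan
-- algorithm: project to (row, x, dir) triples, sort by (row, x), sweep once.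

-- ===== PORT A =====
-- A's loop over i in range(n): left_dict/right_dict updated and cross-checked at
-- every step, with early return "Yes".  xy_list[i]/s[i] via pyGet?; the .getD
-- defaults are unreachable under Pre_solve (Python raises IndexError exactly there).
def solveGoA (xy : List (Int × Int)) (cs : List Char) :
    List Int → PySem.Dict Int Int → PySem.Dict Int Int → String
  | [], _, _ => "No"
  | i :: rest, ld, rd =>
    let p := (PySem.List.pyGet? xy i).getD (0, 0)
    let x := p.1
    let y := p.2
    if (PySem.List.pyGet? cs i).getD ' ' = 'L' then
      let ld' := if ld.contains y = false then ld.insert y x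
                 else ld.insert y (max x (ld.getD y 0))
      if rd.contains y then
        if rd.getD y 0 < x then "Yes" else solveGoA xy cs rest ld' rd
      else solveGoA xy cs rest ld' rd
    else
      let rd' := if rd.contains y = false then rd.insert y x
                 else rd.insert y (min x (rd.getD y 0))
      if ld.contains y then
        if x < ld.getD y 0 then "Yes" else solveGoA xy cs rest ld rd'
      else solveGoA xy cs rest ld rd'

def solve (n : Int) (xy_list : List (Int × Int)) (s : String) : String :=
  solveGoA xy_list s.toList (PySem.List.pyRange 0 n 1) PySem.Dict.empty PySem.Dict.empty

-- ===== PORT B =====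
-- B's comprehension: person i as the triple (y, x, s[i]).
def triB (xy : List (Int × Int)) (cs : List Char) (i : Int) : Int × Int × Char :=
  (((PySem.List.pyGet? xy i).getD (0, 0)).2,
   ((PySem.List.pyGet? xy i).getD (0, 0)).1,
   (PySem.List.pyGet? cs i).getD ' ')

-- B's sweep: cur_y / first_r exactly as in the Python loop.
def scanRowsB : Option Int → Option Int → List (Int × Int × Char) → String
  | _, _, [] => "No"
  | curY, firstR, (y, x, c) :: rest =>
    let st := if curY ≠ some y then (some y, (none : Option Int)) else (curY, firstR)
    if c = 'L' then
      match st.2 with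
      | some r => if r < x then "Yes" else scanRowsB st.1 st.2 rest
      | none => scanRowsB st.1 st.2 rest
    else
      match st.2 with
      | none => scanRowsB st.1 (some x) rest
      | some _ => scanRowsB st.1 st.2 rest

def solve_alt (n : Int) (xy_list : List (Int × Int)) (s : String) : String :=
  let people := (PySem.List.pyRange 0 n 1).map (triB xy_list s.toList)
  scanRowsB none none (PySem.List.sorted2 people (fun t => t.1) (fun t => t.2.1) false)

-- ===== PRECONDITION & SPEC =====
-- Pre_ excludes exactly the inputs where Python raises IndexError: some i in
-- range(n) is out of range for xy_list or s (both A and B index xy_list[i], s[i]).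
def Pre_solve (n : Int) (xy_list : List (Int × Int)) (s : String) : Prop :=
  n ≤ (xy_list.length : Int) ∧ n ≤ (s.toList.length : Int)
instance (n : Int) (xy_list : List (Int × Int)) (s : String) : Decidable (Pre_solve n xy_list s) := by unfold Pre_solve; infer_instance

def pvWitness_solve : Int × (List (Int × Int)) × String := (2, [(1, 0), (3, 0)], "RL")

def Spec_solve (n : Int) (xy_list : List (Int × Int)) (s : String) (out : String) : Prop := out = solve_alt n xy_list s
instance (n : Int) (xy_list : List (Int × Int)) (s : String) (out : String) : Decidable (Spec_solve n xy_list s out) := by unfold Spec_solve; infer_instance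

-- ===== CLAIM =====
def Claim_equal_solve : Prop := ∀ (n : Int) (xy_list : List (Int × Int)) (s : String), Dom_solve n xy_list s → Pre_solve n xy_list s → Spec_solve n xy_list s (solve n xy_list s)

-- ===== LEMMAS AND PROOFS =====

-- "some right-walker strictly left of a left-walker in the same row" (triples are (y, x, c))
def CollP (ts : List (Int × Int × Char)) : Prop :=
  ∃ a ∈ ts, ∃ b ∈ ts, a.1 = b.1 ∧ a.2.2 ≠ 'L' ∧ b.2.2 = 'L' ∧ a.2.1 < b.2.1

lemma collP_perm {ts ts' : List (Int × Int × Char)} (h : ts.Perm ts') : CollP ts ↔ CollP ts' := by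
  unfold CollP
  constructor <;> rintro ⟨a, ha, b, hb, hp⟩
  · exact ⟨a, h.mem_iff.mp ha, b, h.mem_iff.mp hb, hp⟩
  · exact ⟨a, h.mem_iff.mpr ha, b, h.mem_iff.mpr hb, hp⟩

-- running min of right-walker x's in row y / running max of left-walker x's,
-- matching A's dict-update expressions min(x, old) / max(x, old)
def combineMin (acc : Option Int) (x : Int) : Int :=
  match acc with | none => x | some v => min x v
def combineMax (acc : Option Int) (x : Int) : Int :=
  match acc with | none => x | some v => max x v
def stepR (y : Int) (acc : Option Int) (t : Int × Int × Char) : Option Int :=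
  if t.1 = y ∧ t.2.2 ≠ 'L' then some (combineMin acc t.2.1) else acc
def stepL (y : Int) (acc : Option Int) (t : Int × Int × Char) : Option Int :=
  if t.1 = y ∧ t.2.2 = 'L' then some (combineMax acc t.2.1) else acc
def minRf (ts : List (Int × Int × Char)) (y : Int) : Option Int := ts.foldl (stepR y) none
def maxLf (ts : List (Int × Int × Char)) (y : Int) : Option Int := ts.foldl (stepL y) none

lemma combineMin_le (acc : Option Int) (x : Int) : combineMin acc x ≤ x := by
  cases acc with
  | none => exact le_refl _
  | some v => exact min_le_left _ _

lemma combineMax_ge (acc : Option Int) (x : Int) : x ≤ combineMax acc x := by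
  cases acc with
  | none => exact le_refl _
  | some v => exact le_max_left _ _

lemma foldl_stepR_mono (y : Int) :
    ∀ (ts : List (Int × Int × Char)) (v : Int),
      ∃ r, ts.foldl (stepR y) (some v) = some r ∧ r ≤ v := by
  intro ts
  induction ts with
  | nil => intro v; exact ⟨v, rfl, le_refl _⟩
  | cons t rest ih =>
    intro v
    simp only [List.foldl_cons]
    by_cases h : t.1 = y ∧ t.2.2 ≠ 'L'
    · simp only [stepR, if_pos h]
      obtain ⟨r, hr, hle⟩ := ih (combineMin (some v) t.2.1)
      refine ⟨r, hr, le_trans hle ?_⟩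
      simp only [combineMin]
      exact min_le_right _ _
    · simp only [stepR, if_neg h]; exact ih v

lemma foldl_stepL_mono (y : Int) :
    ∀ (ts : List (Int × Int × Char)) (v : Int),
      ∃ r, ts.foldl (stepL y) (some v) = some r ∧ v ≤ r := by
  intro ts
  induction ts with
  | nil => intro v; exact ⟨v, rfl, le_refl _⟩
  | cons t rest ih =>
    intro v
    simp only [List.foldl_cons]
    by_cases h : t.1 = y ∧ t.2.2 = 'L'
    · simp only [stepL, if_pos h]
      obtain ⟨r, hr, hle⟩ := ih (combineMax (some v) t.2.1)
      refine ⟨r, hr, le_trans ?_ hle⟩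
      simp only [combineMax]
      exact le_max_right _ _
    · simp only [stepL, if_neg h]; exact ih v

lemma minRf_le (y : Int) :
    ∀ (ts : List (Int × Int × Char)) (acc : Option Int) (t : Int × Int × Char),
      t ∈ ts → t.1 = y → t.2.2 ≠ 'L' →
      ∃ r, ts.foldl (stepR y) acc = some r ∧ r ≤ t.2.1 := by
  intro ts
  induction ts with
  | nil => intro acc t hmem; cases hmem
  | cons u rest ih =>
    intro acc t hmem hy hc
    simp only [List.foldl_cons]
    rcases List.mem_cons.mp hmem with h | h
    · subst h
      have hstep : stepR y acc t = some (combineMin acc t.2.1) := by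
        simp only [stepR, if_pos (And.intro hy hc)]
      rw [hstep]
      obtain ⟨r, hr, hle⟩ := foldl_stepR_mono y rest (combineMin acc t.2.1)
      exact ⟨r, hr, le_trans hle (combineMin_le acc t.2.1)⟩
    · exact ih (stepR y acc u) t h hy hc

lemma maxLf_ge (y : Int) :
    ∀ (ts : List (Int × Int × Char)) (acc : Option Int) (t : Int × Int × Char),
      t ∈ ts → t.1 = y → t.2.2 = 'L' →
      ∃ r, ts.foldl (stepL y) acc = some r ∧ t.2.1 ≤ r := by
  intro ts
  induction ts with
  | nil => intro acc t hmem; cases hmem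
  | cons u rest ih =>
    intro acc t hmem hy hc
    simp only [List.foldl_cons]
    rcases List.mem_cons.mp hmem with h | h
    · subst h
      have hstep : stepL y acc t = some (combineMax acc t.2.1) := by
        simp only [stepL, if_pos (And.intro hy hc)]
      rw [hstep]
      obtain ⟨r, hr, hle⟩ := foldl_stepL_mono y rest (combineMax acc t.2.1)
      exact ⟨r, hr, le_trans (combineMax_ge acc t.2.1) hle⟩
    · exact ih (stepL y acc u) t h hy hc

lemma minRf_mem (y : Int) :
    ∀ (ts : List (Int × Int × Char)) (acc : Option Int) (r : Int),
      ts.foldl (stepR y) acc = some r →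
      acc = some r ∨ ∃ t ∈ ts, t.1 = y ∧ t.2.2 ≠ 'L' ∧ t.2.1 = r := by
  intro ts
  induction ts with
  | nil => intro acc r h; exact Or.inl h
  | cons u rest ih =>
    intro acc r h
    simp only [List.foldl_cons] at h
    rcases ih (stepR y acc u) r h with h1 | ⟨t, ht, hp⟩
    · by_cases hc : u.1 = y ∧ u.2.2 ≠ 'L'
      · simp only [stepR, if_pos hc] at h1
        cases acc with
        | none =>
          simp only [combineMin, Option.some.injEq] at h1
          exact Or.inr ⟨u, List.mem_cons_self, hc.1, hc.2, h1⟩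
        | some v =>
          simp only [combineMin, Option.some.injEq] at h1
          rcases min_choice u.2.1 v with hm | hm
          · exact Or.inr ⟨u, List.mem_cons_self, hc.1, hc.2, by omega⟩
          · exact Or.inl (by rw [← h1, hm])
      · simp only [stepR, if_neg hc] at h1; exact Or.inl h1
    · exact Or.inr ⟨t, List.mem_cons_of_mem _ ht, hp⟩

lemma maxLf_mem (y : Int) :
    ∀ (ts : List (Int × Int × Char)) (acc : Option Int) (r : Int),
      ts.foldl (stepL y) acc = some r →
      acc = some r ∨ ∃ t ∈ ts, t.1 = y ∧ t.2.2 = 'L' ∧ t.2.1 = r := by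
  intro ts
  induction ts with
  | nil => intro acc r h; exact Or.inl h
  | cons u rest ih =>
    intro acc r h
    simp only [List.foldl_cons] at h
    rcases ih (stepL y acc u) r h with h1 | ⟨t, ht, hp⟩
    · by_cases hc : u.1 = y ∧ u.2.2 = 'L'
      · simp only [stepL, if_pos hc] at h1
        cases acc with
        | none =>
          simp only [combineMax, Option.some.injEq] at h1
          exact Or.inr ⟨u, List.mem_cons_self, hc.1, hc.2, h1⟩
        | some v =>
          simp only [combineMax, Option.some.injEq] at h1
          rcases max_choice u.2.1 v with hm | hm
          · exact Or.inr ⟨u, List.mem_cons_self, hc.1, hc.2, by omega⟩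
          · exact Or.inl (by rw [← h1, hm])
      · simp only [stepL, if_neg hc] at h1; exact Or.inl h1
    · exact Or.inr ⟨t, List.mem_cons_of_mem _ ht, hp⟩

lemma minRf_append_one (ts : List (Int × Int × Char)) (t : Int × Int × Char) (y : Int) :
    minRf (ts ++ [t]) y = stepR y (minRf ts y) t := by
  unfold minRf; rw [List.foldl_append]; rfl

lemma maxLf_append_one (ts : List (Int × Int × Char)) (t : Int × Int × Char) (y : Int) :
    maxLf (ts ++ [t]) y = stepL y (maxLf ts y) t := by
  unfold maxLf; rw [List.foldl_append]; rfl

-- ===== A-side: the online dict pass detects exactly CollP =====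

lemma goA_total (xy : List (Int × Int)) (cs : List Char) :
    ∀ (l : List Int) (ld rd : PySem.Dict Int Int),
      solveGoA xy cs l ld rd = "Yes" ∨ solveGoA xy cs l ld rd = "No" := by
  intro l
  induction l with
  | nil => intro ld rd; exact Or.inr rfl
  | cons i rest ih =>
    intro ld rd
    simp only [solveGoA]
    split
    · split
      · split
        · exact Or.inl rfl
        · exact ih _ _
      · exact ih _ _
    · split
      · split
        · exact Or.inl rfl
        · exact ih _ _
      · exact ih _ _

lemma goA_iff (xy : List (Int × Int)) (cs : List Char) :
    ∀ (l : List Int) (procT : List (Int × Int × Char)) (ld rd : PySem.Dict Int Int),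
      (∀ y, ld.get? y = maxLf procT y) → (∀ y, rd.get? y = minRf procT y) →
      ¬ CollP procT →
      (solveGoA xy cs l ld rd = "Yes" ↔ CollP (procT ++ l.map (triB xy cs))) := by
  intro l
  induction l with
  | nil =>
    intro procT ld rd _ _ hnc
    simp only [solveGoA, List.map_nil, List.append_nil]
    constructor
    · intro h; exact absurd h (by decide)
    · intro h; exact absurd h hnc
  | cons i rest ih =>
    intro procT ld rd hld hrd hnc
    simp only [solveGoA]
    set X := ((PySem.List.pyGet? xy i).getD (0, 0)).1 with hX
    set Y := ((PySem.List.pyGet? xy i).getD (0, 0)).2 with hY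
    set C := (PySem.List.pyGet? cs i).getD ' ' with hC
    have hmap : (i :: rest).map (triB xy cs) = (Y, X, C) :: rest.map (triB xy cs) := rfl
    rw [hmap]
    have happ : procT ++ (Y, X, C) :: rest.map (triB xy cs)
        = (procT ++ [(Y, X, C)]) ++ rest.map (triB xy cs) := by simp
    by_cases hL : C = 'L'
    · rw [if_pos hL]
      have hld' : ∀ y, (if ld.contains Y = false then ld.insert Y X
            else ld.insert Y (max X (ld.getD Y 0))).get? y
          = maxLf (procT ++ [(Y, X, C)]) y := by
        intro y
        rw [maxLf_append_one]
        by_cases hyy : y = Y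
        · rw [hyy]
          cases hg : ld.get? Y with
          | none =>
            have hcont : ld.contains Y = false := by
              rw [PySem.Dict.contains_eq_isSome_get?, hg]; rfl
            have hml : maxLf procT Y = none := by rw [← hld Y]; exact hg
            rw [if_pos hcont, PySem.Dict.get?_insert_self]
            rw [stepL.eq_def, if_pos (And.intro rfl hL), hml]
            rfl
          | some v =>
            have hcont : ¬ ld.contains Y = false := by
              rw [PySem.Dict.contains_eq_isSome_get?, hg]; simp
            have hml : maxLf procT Y = some v := by rw [← hld Y]; exact hg
            have hgd : ld.getD Y 0 = v := PySem.Dict.getD_of_get?_eq_some ld 0 hg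
            rw [if_neg hcont, PySem.Dict.get?_insert_self, hgd]
            rw [stepL.eq_def, if_pos (And.intro rfl hL), hml]
            rfl
        · have hstep : stepL y (maxLf procT y) (Y, X, C) = maxLf procT y := by
            rw [stepL.eq_def, if_neg (fun hcon => hyy hcon.1.symm)]
          rw [hstep]
          split <;> rw [PySem.Dict.get?_insert_of_ne _ _ hyy, hld y]
      have hrd' : ∀ y, rd.get? y = minRf (procT ++ [(Y, X, C)]) y := by
        intro y
        rw [minRf_append_one, stepR.eq_def]
        rw [if_neg (by intro hcon; exact hcon.2 hL), hrd y]
      cases hg : rd.get? Y with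
      | some r =>
        have hcr : rd.contains Y = true := by
          rw [PySem.Dict.contains_eq_isSome_get?, hg]; rfl
        rw [if_pos hcr]
        have hgd : rd.getD Y 0 = r := PySem.Dict.getD_of_get?_eq_some rd 0 hg
        rw [hgd]
        have hminr : minRf procT Y = some r := by rw [← hrd Y]; exact hg
        by_cases hlt : r < X
        · rw [if_pos hlt]
          constructor
          · intro _
            rcases minRf_mem Y procT none r hminr with h0 | ⟨a, ha, ha1, ha2, ha3⟩
            · cases h0
            · refine ⟨a, List.mem_append_left _ ha,
                (Y, X, C), List.mem_append_right _ List.mem_cons_self, ha1, ha2, hL, ?_⟩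
              rw [ha3]; exact hlt
          · intro _; rfl
        · rw [if_neg hlt]
          have hnc' : ¬ CollP (procT ++ [(Y, X, C)]) := by
            rintro ⟨a, ha, b, hb, hab, haR, hbL, hxlt⟩
            rcases List.mem_append.mp ha with haP | haT
            · rcases List.mem_append.mp hb with hbP | hbT
              · exact hnc ⟨a, haP, b, hbP, hab, haR, hbL, hxlt⟩
              · have hbt : b = (Y, X, C) := List.mem_singleton.mp hbT
                subst hbt
                obtain ⟨r', hr', hle⟩ := minRf_le Y procT none a haP (by simpa using hab) haR
                have hr2 : minRf procT Y = some r' := hr'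
                rw [hminr] at hr2
                have hrr : r = r' := Option.some.inj hr2
                simp only at hxlt
                omega
            · have hat : a = (Y, X, C) := List.mem_singleton.mp haT
              subst hat
              exact absurd hL haR
          rw [happ]
          exact ih (procT ++ [(Y, X, C)]) _ rd hld' hrd' hnc'
      | none =>
        have hcr : ¬ rd.contains Y = true := by
          rw [PySem.Dict.contains_eq_isSome_get?, hg]; simp
        rw [if_neg hcr]
        have hnone : minRf procT Y = none := by rw [← hrd Y]; exact hg
        have hnc' : ¬ CollP (procT ++ [(Y, X, C)]) := by
          rintro ⟨a, ha, b, hb, hab, haR, hbL, hxlt⟩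
          rcases List.mem_append.mp ha with haP | haT
          · rcases List.mem_append.mp hb with hbP | hbT
            · exact hnc ⟨a, haP, b, hbP, hab, haR, hbL, hxlt⟩
            · have hbt : b = (Y, X, C) := List.mem_singleton.mp hbT
              subst hbt
              obtain ⟨r', hr', _⟩ := minRf_le Y procT none a haP (by simpa using hab) haR
              have hr2 : minRf procT Y = some r' := hr'
              rw [hnone] at hr2
              cases hr2
          · have hat : a = (Y, X, C) := List.mem_singleton.mp haT
            subst hat
            exact absurd hL haR
        rw [happ]
        exact ih (procT ++ [(Y, X, C)]) _ rd hld' hrd' hnc'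
    · rw [if_neg hL]
      have hrd' : ∀ y, (if rd.contains Y = false then rd.insert Y X
            else rd.insert Y (min X (rd.getD Y 0))).get? y
          = minRf (procT ++ [(Y, X, C)]) y := by
        intro y
        rw [minRf_append_one]
        by_cases hyy : y = Y
        · rw [hyy]
          cases hg : rd.get? Y with
          | none =>
            have hcont : rd.contains Y = false := by
              rw [PySem.Dict.contains_eq_isSome_get?, hg]; rfl
            have hml : minRf procT Y = none := by rw [← hrd Y]; exact hg
            rw [if_pos hcont, PySem.Dict.get?_insert_self]
            rw [stepR.eq_def, if_pos (And.intro rfl hL), hml]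
            rfl
          | some v =>
            have hcont : ¬ rd.contains Y = false := by
              rw [PySem.Dict.contains_eq_isSome_get?, hg]; simp
            have hml : minRf procT Y = some v := by rw [← hrd Y]; exact hg
            have hgd : rd.getD Y 0 = v := PySem.Dict.getD_of_get?_eq_some rd 0 hg
            rw [if_neg hcont, PySem.Dict.get?_insert_self, hgd]
            rw [stepR.eq_def, if_pos (And.intro rfl hL), hml]
            rfl
        · have hstep : stepR y (minRf procT y) (Y, X, C) = minRf procT y := by
            rw [stepR.eq_def, if_neg (fun hcon => hyy hcon.1.symm)]
          rw [hstep]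
          split <;> rw [PySem.Dict.get?_insert_of_ne _ _ hyy, hrd y]
      have hld' : ∀ y, ld.get? y = maxLf (procT ++ [(Y, X, C)]) y := by
        intro y
        rw [maxLf_append_one, stepL.eq_def]
        rw [if_neg (by intro hcon; exact hL hcon.2), hld y]
      cases hg : ld.get? Y with
      | some m =>
        have hcl : ld.contains Y = true := by
          rw [PySem.Dict.contains_eq_isSome_get?, hg]; rfl
        rw [if_pos hcl]
        have hgd : ld.getD Y 0 = m := PySem.Dict.getD_of_get?_eq_some ld 0 hg
        rw [hgd]
        have hmaxl : maxLf procT Y = some m := by rw [← hld Y]; exact hg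
        by_cases hlt : X < m
        · rw [if_pos hlt]
          constructor
          · intro _
            rcases maxLf_mem Y procT none m hmaxl with h0 | ⟨b, hb, hb1, hb2, hb3⟩
            · cases h0
            · refine ⟨(Y, X, C), List.mem_append_right _ List.mem_cons_self,
                b, List.mem_append_left _ hb, hb1.symm, hL, hb2, ?_⟩
              show X < b.2.1
              rw [hb3]; exact hlt
          · intro _; rfl
        · rw [if_neg hlt]
          have hnc' : ¬ CollP (procT ++ [(Y, X, C)]) := by
            rintro ⟨a, ha, b, hb, hab, haR, hbL, hxlt⟩
            rcases List.mem_append.mp hb with hbP | hbT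
            · rcases List.mem_append.mp ha with haP | haT
              · exact hnc ⟨a, haP, b, hbP, hab, haR, hbL, hxlt⟩
              · have hat : a = (Y, X, C) := List.mem_singleton.mp haT
                subst hat
                obtain ⟨m', hm', hge⟩ := maxLf_ge Y procT none b hbP (by simpa using hab.symm) hbL
                have hm2 : maxLf procT Y = some m' := hm'
                rw [hmaxl] at hm2
                have hmm : m = m' := Option.some.inj hm2
                simp only at hxlt
                omega
            · have hbt : b = (Y, X, C) := List.mem_singleton.mp hbT
              subst hbt
              exact hL hbL
          rw [happ]
          exact ih (procT ++ [(Y, X, C)]) ld _ hld' hrd' hnc'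
      | none =>
        have hcl : ¬ ld.contains Y = true := by
          rw [PySem.Dict.contains_eq_isSome_get?, hg]; simp
        rw [if_neg hcl]
        have hnone : maxLf procT Y = none := by rw [← hld Y]; exact hg
        have hnc' : ¬ CollP (procT ++ [(Y, X, C)]) := by
          rintro ⟨a, ha, b, hb, hab, haR, hbL, hxlt⟩
          rcases List.mem_append.mp hb with hbP | hbT
          · rcases List.mem_append.mp ha with haP | haT
            · exact hnc ⟨a, haP, b, hbP, hab, haR, hbL, hxlt⟩
            · have hat : a = (Y, X, C) := List.mem_singleton.mp haT
              subst hat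
              obtain ⟨m', hm', _⟩ := maxLf_ge Y procT none b hbP (by simpa using hab.symm) hbL
              have hm2 : maxLf procT Y = some m' := hm'
              rw [hnone] at hm2
              cases hm2
          · have hbt : b = (Y, X, C) := List.mem_singleton.mp hbT
            subst hbt
            exact hL hbL
        rw [happ]
        exact ih (procT ++ [(Y, X, C)]) ld _ hld' hrd' hnc'

-- ===== B-side: sortedness of sorted2 and the sweep =====

-- lexicographic ≤ on (row, x)
def LexLe (a b : Int × Int × Char) : Prop := a.1 < b.1 ∨ (a.1 = b.1 ∧ a.2.1 ≤ b.2.1)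

def ltB (a b : Int × Int × Char) : Bool :=
  decide (a.1 < b.1) || (!decide (b.1 < a.1) && decide (a.2.1 < b.2.1))

lemma insertBy_pairwise (x : Int × Int × Char) :
    ∀ (ys : List (Int × Int × Char)), ys.Pairwise LexLe →
      (PySem.List.insertBy ltB x ys).Pairwise LexLe := by
  intro ys
  induction ys with
  | nil =>
    intro _
    simp [PySem.List.insertBy]
  | cons y ys ih =>
    intro hp
    rcases List.pairwise_cons.mp hp with ⟨hy, hys⟩
    rw [PySem.List.insertBy]
    by_cases hb : ltB x y = true
    · rw [if_pos hb]
      have hxy : LexLe x y := by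
        unfold ltB at hb; unfold LexLe
        simp only [Bool.or_eq_true, Bool.and_eq_true, Bool.not_eq_true', decide_eq_true_eq,
          decide_eq_false_iff_not] at hb
        omega
      refine List.pairwise_cons.mpr ⟨?_, hp⟩
      intro z hz
      rcases List.mem_cons.mp hz with hz | hz
      · subst hz; exact hxy
      · have hyz : LexLe y z := hy z hz
        unfold ltB at hb
        simp only [Bool.or_eq_true, Bool.and_eq_true, Bool.not_eq_true', decide_eq_true_eq,
          decide_eq_false_iff_not] at hb
        unfold LexLe at hyz ⊢
        omega
    · rw [if_neg hb]
      refine List.pairwise_cons.mpr ⟨?_, ih hys⟩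
      intro z hz
      rcases (PySem.List.mem_insertBy ltB x z ys).mp hz with hz | hz
      · subst hz
        unfold ltB at hb
        simp only [Bool.or_eq_true, Bool.and_eq_true, Bool.not_eq_true', decide_eq_true_eq,
          decide_eq_false_iff_not, not_or, not_and] at hb
        unfold LexLe
        omega
      · exact hy z hz

lemma sorted2_pairwise_lex (ts : List (Int × Int × Char)) :
    (PySem.List.sorted2 ts (fun t => t.1) (fun t => t.2.1) false).Pairwise LexLe := by
  show (ts.foldl (fun acc x => PySem.List.insertBy ltB x acc) []).Pairwise LexLe
  suffices h : ∀ (l acc : List (Int × Int × Char)), acc.Pairwise LexLe →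
      (l.foldl (fun acc x => PySem.List.insertBy ltB x acc) acc).Pairwise LexLe by
    exact h ts [] List.Pairwise.nil
  intro l
  induction l with
  | nil => intro acc h; exact h
  | cons t rest ih =>
    intro acc h
    exact ih _ (insertBy_pairwise t acc h)

-- the "pending collision" the sweep state can still detect
def D2 (l : List (Int × Int × Char)) (cy? r? : Option Int) : Prop :=
  ∃ cy r, cy? = some cy ∧ r? = some r ∧ ∃ b ∈ l, b.1 = cy ∧ b.2.2 = 'L' ∧ r < b.2.1

lemma collP_cons (t : Int × Int × Char) (rest : List (Int × Int × Char)) :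
    CollP (t :: rest) ↔ CollP rest
      ∨ (∃ b ∈ rest, t.1 = b.1 ∧ t.2.2 ≠ 'L' ∧ b.2.2 = 'L' ∧ t.2.1 < b.2.1)
      ∨ (∃ a ∈ rest, a.1 = t.1 ∧ a.2.2 ≠ 'L' ∧ t.2.2 = 'L' ∧ a.2.1 < t.2.1) := by
  unfold CollP
  constructor
  · rintro ⟨a, ha, b, hb, hab, haR, hbL, hlt⟩
    rcases List.mem_cons.mp ha with ha1 | ha1
    · subst ha1
      rcases List.mem_cons.mp hb with hb1 | hb1
      · subst hb1; exact absurd hbL haR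
      · exact Or.inr (Or.inl ⟨b, hb1, hab, haR, hbL, hlt⟩)
    · rcases List.mem_cons.mp hb with hb1 | hb1
      · subst hb1; exact Or.inr (Or.inr ⟨a, ha1, hab, haR, hbL, hlt⟩)
      · exact Or.inl ⟨a, ha1, b, hb1, hab, haR, hbL, hlt⟩
  · rintro (⟨a, ha, b, hb, hp⟩ | ⟨b, hb, hp⟩ | ⟨a, ha, hp⟩)
    · exact ⟨a, List.mem_cons_of_mem _ ha, b, List.mem_cons_of_mem _ hb, hp⟩
    · exact ⟨t, List.mem_cons_self, b, List.mem_cons_of_mem _ hb, hp⟩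
    · exact ⟨a, List.mem_cons_of_mem _ ha, t, List.mem_cons_self, hp⟩

lemma scanB_total :
    ∀ (l : List (Int × Int × Char)) (cy? r? : Option Int),
      scanRowsB cy? r? l = "Yes" ∨ scanRowsB cy? r? l = "No" := by
  intro l
  induction l with
  | nil => intro _ _; exact Or.inr rfl
  | cons t rest ih =>
    intro cy? r?
    obtain ⟨y, x, c⟩ := t
    simp only [scanRowsB]
    split
    · split
      · split
        · exact Or.inl rfl
        · exact ih _ _
      · exact ih _ _
    · split
      · exact ih _ _
      · exact ih _ _

lemma scanB_iff :
    ∀ (l : List (Int × Int × Char)) (cy? r? : Option Int),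
      l.Pairwise LexLe →
      (∀ cy, cy? = some cy → ∀ t ∈ l, cy ≤ t.1) →
      (∀ cy r, cy? = some cy → r? = some r → ∀ t ∈ l, t.1 = cy → r ≤ t.2.1) →
      (scanRowsB cy? r? l = "Yes" ↔ (CollP l ∨ D2 l cy? r?)) := by
  intro l
  induction l with
  | nil =>
    intro cy? r? _ _ _
    simp only [scanRowsB]
    constructor
    · intro h; exact absurd h (by decide)
    · rintro (⟨a, ha, _⟩ | ⟨cy, r, _, _, b, hb, _⟩)
      · cases ha
      · cases hb
  | cons t rest ih =>
    intro cy? r? hpw h2 h3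
    obtain ⟨y, x, c⟩ := t
    rcases List.pairwise_cons.mp hpw with ⟨hhd, hrest⟩
    have hhd1 : ∀ u ∈ rest, y ≤ u.1 := by
      intro u hu; have := hhd u hu; unfold LexLe at this; simp only at this; omega
    have hhd2 : ∀ u ∈ rest, u.1 = y → x ≤ u.2.1 := by
      intro u hu hr; have := hhd u hu; unfold LexLe at this; simp only at this; omega
    by_cases hne : cy? = some y
    · -- no reset: the state stays (some y, r?)
      subst hne
      have h2' : ∀ cy, (some y : Option Int) = some cy → ∀ u ∈ rest, cy ≤ u.1 :=
        fun cy hcy u hu => h2 cy hcy u (List.mem_cons_of_mem _ hu)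
      cases r? with
      | none =>
        have hred : scanRowsB (some y) none ((y, x, c) :: rest)
            = if c = 'L' then scanRowsB (some y) none rest
              else scanRowsB (some y) (some x) rest := by
          simp [scanRowsB]
        rw [hred]
        have hD2n : ∀ l', ¬ D2 l' (some y) (none : Option Int) := by
          rintro l' ⟨cy, r, _, hr, _⟩; cases hr
        by_cases hcL : c = 'L'
        · rw [if_pos hcL, ih (some y) none hrest h2' (by intro _ _ _ hr; cases hr)]
          constructor
          · rintro (hcp | hd2)
            · exact Or.inl ((collP_cons _ _).mpr (Or.inl hcp))
            · exact absurd hd2 (hD2n rest)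
          · rintro (hcp | hd2)
            · rcases (collP_cons _ _).mp hcp with h | ⟨b, hb, _, hR, _⟩ | ⟨a, ha, ha1, ha2, _, ha3⟩
              · exact Or.inl h
              · exact absurd hcL hR
              · exfalso
                have := hhd2 a ha (by simpa using ha1)
                simp only at ha3
                omega
            · exact absurd hd2 (hD2n _)
        · rw [if_neg hcL, ih (some y) (some x) hrest h2'
            (by intro cy r hcy hr u hu hrow; cases hcy; cases hr; exact hhd2 u hu hrow)]
          constructor
          · rintro (hcp | ⟨cy, r', hcy, hr', b, hb, hb1, hb2, hb3⟩)
            · exact Or.inl ((collP_cons _ _).mpr (Or.inl hcp))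
            · cases hcy; cases hr'
              exact Or.inl ((collP_cons _ _).mpr (Or.inr (Or.inl
                ⟨b, hb, by simpa using hb1.symm, hcL, hb2, by simpa using hb3⟩)))
          · rintro (hcp | hd2)
            · rcases (collP_cons _ _).mp hcp with h | ⟨b, hb, hb1, _, hb3, hb4⟩ | ⟨a, ha, _, _, hL, _⟩
              · exact Or.inl h
              · exact Or.inr ⟨y, x, rfl, rfl, b, hb, by simpa using hb1.symm, hb3, by simpa using hb4⟩
              · exact absurd hL hcL
            · exact absurd hd2 (hD2n _)
      | some r =>
        have hred : scanRowsB (some y) (some r) ((y, x, c) :: rest)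
            = if c = 'L' then (if r < x then "Yes" else scanRowsB (some y) (some r) rest)
              else scanRowsB (some y) (some r) rest := by
          simp [scanRowsB]
        rw [hred]
        have hrx : r ≤ x := h3 y r rfl rfl (y, x, c) List.mem_cons_self rfl
        have h3' : ∀ cy r', (some y : Option Int) = some cy → (some r : Option Int) = some r' →
            ∀ u ∈ rest, u.1 = cy → r' ≤ u.2.1 :=
          fun cy r' hcy hr' u hu hrow => h3 cy r' hcy hr' u (List.mem_cons_of_mem _ hu) hrow
        by_cases hcL : c = 'L'
        · rw [if_pos hcL]
          by_cases hlt : r < x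
          · rw [if_pos hlt]
            constructor
            · intro _
              exact Or.inr ⟨y, r, rfl, rfl, (y, x, c), List.mem_cons_self, rfl, hcL, hlt⟩
            · intro _; rfl
          · rw [if_neg hlt, ih (some y) (some r) hrest h2' h3']
            constructor
            · rintro (hcp | ⟨cy, r', hcy, hr', b, hb, hbp⟩)
              · exact Or.inl ((collP_cons _ _).mpr (Or.inl hcp))
              · exact Or.inr ⟨cy, r', hcy, hr', b, List.mem_cons_of_mem _ hb, hbp⟩
            · rintro (hcp | ⟨cy, r', hcy, hr', b, hb, hb1, hb2, hb3⟩)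
              · rcases (collP_cons _ _).mp hcp with h | ⟨b, hb, _, hR, _⟩ | ⟨a, ha, ha1, ha2, _, ha3⟩
                · exact Or.inl h
                · exact absurd hcL hR
                · exfalso
                  have hra := h3' y r rfl rfl a ha (by simpa using ha1)
                  simp only at ha3
                  omega
              · rcases List.mem_cons.mp hb with hb0 | hb0
                · exfalso
                  cases hcy; cases hr'
                  rw [hb0] at hb1 hb2 hb3
                  simp only at hb1 hb2 hb3
                  omega
                · exact Or.inr ⟨cy, r', hcy, hr', b, hb0, hb1, hb2, hb3⟩
        · rw [if_neg hcL, ih (some y) (some r) hrest h2' h3']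
          constructor
          · rintro (hcp | ⟨cy, r', hcy, hr', b, hb, hb1, hb2, hb3⟩)
            · exact Or.inl ((collP_cons _ _).mpr (Or.inl hcp))
            · exact Or.inr ⟨cy, r', hcy, hr', b, List.mem_cons_of_mem _ hb, hb1, hb2, hb3⟩
          · rintro (hcp | ⟨cy, r', hcy, hr', b, hb, hb1, hb2, hb3⟩)
            · rcases (collP_cons _ _).mp hcp with h | ⟨b, hb, hb1, _, hb3, hb4⟩ | ⟨a, ha, _, _, hL, _⟩
              · exact Or.inl h
              · refine Or.inr ⟨y, r, rfl, rfl, b, hb, by simpa using hb1.symm, hb3, ?_⟩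
                simp only at hb4; omega
              · exact absurd hL hcL
            · rcases List.mem_cons.mp hb with hb0 | hb0
              · exfalso; rw [hb0] at hb2; exact hcL (by simpa using hb2)
              · exact Or.inr ⟨cy, r', hcy, hr', b, hb0, hb1, hb2, hb3⟩
    · -- reset: the state becomes (some y, none)
      have hred : scanRowsB cy? r? ((y, x, c) :: rest)
          = if c = 'L' then scanRowsB (some y) none rest
            else scanRowsB (some y) (some x) rest := by
        simp [scanRowsB, hne]
      rw [hred]
      have hD2old : ¬ D2 ((y, x, c) :: rest) cy? r? := by
        rintro ⟨cy, r, hcy, hr, b, hb, hb1, hb2, hb3⟩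
        have hcyy : cy ≤ y := h2 cy hcy (y, x, c) List.mem_cons_self
        have hcyne : cy ≠ y := fun hh => hne (hh ▸ hcy)
        rcases List.mem_cons.mp hb with hb0 | hb0
        · rw [hb0] at hb1; simp only at hb1; omega
        · have := hhd1 b hb0; omega
      have h2' : ∀ cy, (some y : Option Int) = some cy → ∀ u ∈ rest, cy ≤ u.1 :=
        fun cy hcy u hu => by cases hcy; exact hhd1 u hu
      by_cases hcL : c = 'L'
      · rw [if_pos hcL, ih (some y) none hrest h2' (by intro _ _ _ hr; cases hr)]
        constructor
        · rintro (hcp | ⟨cy, r', _, hr', _⟩)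
          · exact Or.inl ((collP_cons _ _).mpr (Or.inl hcp))
          · cases hr'
        · rintro (hcp | hd2)
          · rcases (collP_cons _ _).mp hcp with h | ⟨b, hb, _, hR, _⟩ | ⟨a, ha, ha1, ha2, _, ha3⟩
            · exact Or.inl h
            · exact absurd hcL hR
            · exfalso
              have := hhd2 a ha (by simpa using ha1)
              simp only at ha3
              omega
          · exact absurd hd2 hD2old
      · rw [if_neg hcL, ih (some y) (some x) hrest h2'
          (by intro cy r hcy hr u hu hrow; cases hcy; cases hr; exact hhd2 u hu hrow)]
        constructor
        · rintro (hcp | ⟨cy, r', hcy, hr', b, hb, hb1, hb2, hb3⟩)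
          · exact Or.inl ((collP_cons _ _).mpr (Or.inl hcp))
          · cases hcy; cases hr'
            exact Or.inl ((collP_cons _ _).mpr (Or.inr (Or.inl
              ⟨b, hb, by simpa using hb1.symm, hcL, hb2, by simpa using hb3⟩)))
        · rintro (hcp | hd2)
          · rcases (collP_cons _ _).mp hcp with h | ⟨b, hb, hb1, _, hb3, hb4⟩ | ⟨a, ha, _, _, hL, _⟩
            · exact Or.inl h
            · exact Or.inr ⟨y, x, rfl, rfl, b, hb, by simpa using hb1.symm, hb3, by simpa using hb4⟩
            · exact absurd hL hcL
          · exact absurd hd2 hD2old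

-- ===== VERDICT =====
theorem solve_spec : Claim_equal_solve := by
  intro n xy s _ _
  unfold Spec_solve solve solve_alt
  have hA := goA_iff xy s.toList (PySem.List.pyRange 0 n 1) [] PySem.Dict.empty PySem.Dict.empty
    (fun y => by rw [PySem.Dict.get?_empty]; rfl)
    (fun y => by rw [PySem.Dict.get?_empty]; rfl)
    (by rintro ⟨a, ha, _⟩; cases ha)
  rw [List.nil_append] at hA
  have hperm := PySem.List.sorted2_perm ((PySem.List.pyRange 0 n 1).map (triB xy s.toList))
    (fun t => t.1) (fun t => t.2.1) false
  have hB := scanB_iff (PySem.List.sorted2 ((PySem.List.pyRange 0 n 1).map (triB xy s.toList))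
      (fun t => t.1) (fun t => t.2.1) false) none none
    (sorted2_pairwise_lex _)
    (fun cy hcy => by cases hcy)
    (fun cy r hcy => by cases hcy)
  have hD2none : ¬ D2 (PySem.List.sorted2 ((PySem.List.pyRange 0 n 1).map (triB xy s.toList))
      (fun t => t.1) (fun t => t.2.1) false) none none := by
    rintro ⟨cy, r, hcy, _⟩; cases hcy
  by_cases hc : CollP ((PySem.List.pyRange 0 n 1).map (triB xy s.toList))
  · rw [hA.mpr hc, hB.mpr (Or.inl ((collP_perm hperm).mpr hc))]
  · rcases goA_total xy s.toList (PySem.List.pyRange 0 n 1) PySem.Dict.empty PySem.Dict.empty with h | h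
    · exact absurd (hA.mp h) hc
    · rw [h]
      rcases scanB_total (PySem.List.sorted2 ((PySem.List.pyRange 0 n 1).map (triB xy s.toList))
          (fun t => t.1) (fun t => t.2.1) false) none none with h2 | h2
      · rcases hB.mp h2 with hcp | hd2
        · exact absurd ((collP_perm hperm).mp hcp) hc
        · exact absurd hd2 hD2none
      · rw [h2]
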